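-- pv_equiv track=rewrite | github.com/artgaurav16420-oss/Hello | data_cache.py | _parse_owner_pid
-- ===== SOURCE A (Python) =====
-- from typing import Any, Dict, List, Optional
--
-- def _parse_owner_pid(content: str) -> Optional[int]:
--     for part in content.split():
--         if part.startswith("pid="):
--             try:
--                 return int(part.split("=", 1)[1])
--             except (ValueError, IndexError):
--                 return None
--     return None
-- ===== SOURCE B (Python) =====
-- def _parse_owner_pid(content):
--     i = content.find("pid=")
--     while i != -1:
--         if i == 0 or content[i - 1].isspace():
--             value = content[i + 4:]
--             for j, ch in enumerate(value):
--                 if ch.isspace():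
--                     value = value[:j]
--                     break
--             try:
--                 return int(value)
--             except ValueError:
--                 return None
--         i = content.find("pid=", i + 1)
--     return None
-- ===== Notes on version B (the rewrite author's own statement) =====
-- stated objective: alternative
-- what changed: Instead of tokenizing the string (A splits it into whitespace-separated tokens and scans them with startswith plus a per-token split on '='), B iterates over the occurrences of the literal substring 'pid=' via str.find, keeps only those at a token boundary (start of string or preceded by whitespace), and slices the value up to the next whitespace.
import Mathlib
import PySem

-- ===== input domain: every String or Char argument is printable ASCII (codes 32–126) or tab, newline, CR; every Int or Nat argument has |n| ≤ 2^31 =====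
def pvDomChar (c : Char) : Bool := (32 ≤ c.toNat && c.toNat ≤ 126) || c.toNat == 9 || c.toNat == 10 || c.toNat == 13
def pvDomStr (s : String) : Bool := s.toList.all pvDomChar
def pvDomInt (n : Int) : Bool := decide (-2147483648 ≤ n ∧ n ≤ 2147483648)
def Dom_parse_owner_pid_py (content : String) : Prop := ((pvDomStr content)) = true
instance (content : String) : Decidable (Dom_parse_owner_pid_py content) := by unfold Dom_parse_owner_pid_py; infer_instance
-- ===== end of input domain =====

-- B replaces A's tokenization (split() then a startswith scan with a per-token split on '=')
-- by iterating over the occurrences of the literal substring "pid=" with str.find, keeping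
-- only occurrences at a token boundary (objective: alternative).

-- ===== PORT A =====
-- the for-loop over content.split(): first token starting with "pid=" decides the result
def pvGoA : List String → Option Int
  | [] => none
  | part :: rest =>
    if PySem.Str.startswith part "pid=" then
      match PySem.Str.splitMax? part "=" 1 with
      | none => none
      | some pieces =>
        match PySem.List.pyGet? pieces 1 with
        | none => none                       -- IndexError → return None
        | some tail => PySem.Int.ofStr? tail -- int(...); ValueError → None is ofStr? = none
    else pvGoA rest

def parse_owner_pid_py (content : String) : Option Int :=
  pvGoA (PySem.Str.split₀ content)

-- ===== PORT B =====
def pvPid : List Char := ['p', 'i', 'd', '=']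
def pvNonspace (d : Char) : Bool := !PySem.Chars.isspace d

-- k past the end of s makes findFrom return -1 (needed for the termination proof of pvScan)
theorem pvFindFrom_past (s sub : List Char) (k : Nat) (h : s.length < k) :
    PySem.Chars.findFrom s sub (k : Int) none = -1 := by
  simp only [PySem.Chars.findFrom]
  have h1 : ¬ ((k : Int) < 0) := by omega
  rw [if_neg h1, if_pos (by exact_mod_cast h)]

-- the while loop of Source B: i = content.find("pid=", k); boundary check via the preceding char;
-- on a boundary hit, the value is content[i+4:] truncated at the first whitespace
def pvScan (s : List Char) (k : Nat) : Option Int :=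
  let i := PySem.Chars.findFrom s pvPid (k : Int)
  if hi : i = -1 then none
  else if i = 0 ∨ PySem.Chars.isspace (s.getD (i.toNat - 1) ' ') then
    PySem.Int.ofChars? ((s.drop (i.toNat + 4)).takeWhile pvNonspace)
  else pvScan s (i.toNat + 1)
termination_by s.length + 1 - k
decreasing_by
  by_cases hk : k ≤ s.length
  · obtain ⟨hle, hpre, -⟩ := PySem.Chars.findFrom_natCast_spec s pvPid k hk hi
    have h4 : pvPid.length ≤ (s.drop (PySem.Chars.findFrom s pvPid (k : Int)).toNat).length :=
      hpre.length_le
    simp only [List.length_drop, pvPid] at h4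
    omega
  · exact absurd (pvFindFrom_past s pvPid k (by omega)) hi

def parse_owner_pid_py_alt (content : String) : Option Int :=
  pvScan content.toList 0

-- ===== PRECONDITION & SPEC =====
def Spec_parse_owner_pid_py (content : String) (out : Option Int) : Prop := out = parse_owner_pid_py_alt content
instance (content : String) (out : Option Int) : Decidable (Spec_parse_owner_pid_py content out) := by unfold Spec_parse_owner_pid_py; infer_instance

-- ===== CLAIM (what is proved, stated in full; the proofs are below) =====
def Claim_equal_parse_owner_pid_py : Prop := ∀ (content : String), Dom_parse_owner_pid_py content → Spec_parse_owner_pid_py content (parse_owner_pid_py content)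

-- ===== LEMMAS AND PROOFS =====

-- ---- A-side characterization: pvGoA over split₀ equals a char-by-char scan ----

-- char-level scan that stops at the first token starting with "pid=" (proof-side bridge)
def pvAltScan : List Char → Option Int
  | [] => none
  | c :: rest =>
    if PySem.Chars.isspace c then pvAltScan rest
    else if (c :: rest).take 4 = pvPid then
      PySem.Int.ofChars? (((c :: rest).takeWhile pvNonspace).drop 4)
    else pvAltScan (rest.dropWhile pvNonspace)
termination_by cs => cs.length
decreasing_by
  · simp
  · have := List.length_dropWhile_le pvNonspace rest
    simp; omega

-- split₀.go's accumulator only prepends already-finished tokens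
theorem pvGo_acc (cs : List Char) : ∀ cur acc,
    PySem.Chars.split₀.go cs cur acc = acc.reverse ++ PySem.Chars.split₀.go cs cur [] := by
  induction cs with
  | nil => intro cur acc; simp [PySem.Chars.split₀.go]; split_ifs <;> simp
  | cons c rest ih =>
    intro cur acc
    simp only [PySem.Chars.split₀.go]
    by_cases h1 : PySem.Chars.isspace c
    · by_cases h2 : cur.isEmpty
      · simp [h1, h2, ih [] acc]
      · simp only [h1, h2, if_true]
        rw [ih [] (cur.reverse :: acc), ih [] [cur.reverse]]
        simp
    · simp [h1, ih (c :: cur) acc]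

-- while a token is in progress, split₀ finishes the current maximal nonspace run first
theorem pvGo_tok (rest : List Char) : ∀ cur, cur ≠ [] →
    PySem.Chars.split₀.go rest cur [] =
      (cur.reverse ++ rest.takeWhile pvNonspace) :: PySem.Chars.split₀.go (rest.dropWhile pvNonspace) [] [] := by
  induction rest with
  | nil => intro cur h; simp [PySem.Chars.split₀.go, h]
  | cons d rs ih =>
    intro cur h
    by_cases hd : PySem.Chars.isspace d
    · have : pvNonspace d = false := by simp [pvNonspace, hd]
      simp [PySem.Chars.split₀.go, hd, h, this, pvGo_acc rs [] [cur.reverse]]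
    · have : pvNonspace d = true := by simp [pvNonspace, hd]
      simp only [PySem.Chars.split₀.go, hd, List.takeWhile_cons, List.dropWhile_cons, this,
        if_true]
      rw [ih (d :: cur) (by simp)]
      simp

-- a "pid=" token splits at its first '=' exactly into "pid" and the value
theorem pvSplitPid (tail : List Char) :
    PySem.Chars.splitMax? ('p' :: 'i' :: 'd' :: '=' :: tail) ['='] 1 = some [['p', 'i', 'd'], tail] := by
  simp [PySem.Chars.splitMax?, PySem.Chars.splitOnMax, PySem.Chars.splitOnMax.go]
  cases tail <;> simp [PySem.Chars.splitOnMax.go]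

-- core A-side equivalence: the char scan computes A's loop over the tokens of split₀
theorem pvMain (cs : List Char) :
    pvAltScan cs = pvGoA (List.map String.ofList (PySem.Chars.split₀.go cs [] [])) := by
  induction cs using pvAltScan.induct with
  | case1 => simp [pvAltScan, PySem.Chars.split₀.go, pvGoA]
  | case2 c rest hsp ih =>
    rw [pvAltScan]
    simp [hsp, PySem.Chars.split₀.go, ih]
  | case3 c rest hsp htake =>
    obtain ⟨d1, d2, d3, r, rfl⟩ : ∃ d1 d2 d3 r, rest = d1 :: d2 :: d3 :: r := by
      cases rest with
      | nil => simp [List.take, pvPid] at htake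
      | cons a t =>
        cases t with
        | nil => simp [List.take, pvPid] at htake
        | cons b u =>
          cases u with
          | nil => simp [List.take, pvPid] at htake
          | cons e v => exact ⟨a, b, e, v, rfl⟩
    have h4 := htake
    simp [List.take, pvPid] at h4
    obtain ⟨rfl, rfl, rfl, rfl⟩ := h4
    rw [pvAltScan, if_neg hsp, if_pos htake]
    rw [show PySem.Chars.split₀.go ('p' :: 'i' :: 'd' :: '=' :: r) [] [] =
        PySem.Chars.split₀.go ('i' :: 'd' :: '=' :: r) ['p'] [] by
      simp [PySem.Chars.split₀.go, hsp]]
    rw [pvGo_tok _ ['p'] (by simp)]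
    have hp : pvNonspace 'p' = true := by decide
    have hi : pvNonspace 'i' = true := by decide
    have hd : pvNonspace 'd' = true := by decide
    have he : pvNonspace '=' = true := by decide
    simp only [List.takeWhile_cons, hp, hi, hd, he, if_true, List.reverse_cons,
      List.reverse_nil, List.nil_append, List.cons_append, List.map_cons, pvGoA]
    have hsw : PySem.Str.startswith
        (String.ofList ('p' :: 'i' :: 'd' :: '=' :: List.takeWhile pvNonspace r)) "pid=" = true := by
      simp [PySem.Str.startswith_eq, PySem.Chars.startswith, List.isPrefixOf]
    rw [hsw]
    simp only [if_true]
    have hsm : PySem.Str.splitMax?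
        (String.ofList ('p' :: 'i' :: 'd' :: '=' :: List.takeWhile pvNonspace r)) "=" 1 =
        some [String.ofList ['p', 'i', 'd'], String.ofList (List.takeWhile pvNonspace r)] := by
      simp [PySem.Str.splitMax?, pvSplitPid]
    rw [hsm]
    simp [PySem.List.pyGet?, PySem.List.pyIdx?, PySem.Int.ofStr?]
  | case4 c rest hsp htake ih =>
    rw [pvAltScan, if_neg hsp, if_neg htake]
    have hcns : pvNonspace c = true := by simp [pvNonspace, hsp]
    rw [show PySem.Chars.split₀.go (c :: rest) [] [] = PySem.Chars.split₀.go rest [c] [] by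
      simp [PySem.Chars.split₀.go, hsp]]
    rw [pvGo_tok rest [c] (by simp)]
    have hns : PySem.Chars.startswith (c :: rest.takeWhile pvNonspace) ['p', 'i', 'd', '='] = false := by
      rw [PySem.Chars.startswith]
      by_contra hcon
      simp only [Bool.not_eq_false, List.isPrefixOf_iff_prefix] at hcon
      have hpre2 : pvPid <+: (c :: rest) := by
        calc pvPid <+: c :: rest.takeWhile pvNonspace := by simpa [pvPid] using hcon
          _ <+: c :: rest := by
              exact List.cons_prefix_cons.mpr ⟨rfl, List.takeWhile_prefix pvNonspace⟩
      have h4 : pvPid = (c :: rest).take 4 := by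
        have := List.prefix_iff_eq_take.mp hpre2
        simpa [pvPid] using this
      exact htake h4.symm
    simp [hns, pvGoA, ih]

-- ---- B-side characterization: pvScan equals a positional char scan with a boundary flag ----

-- flag-carrying char scan: the flag says whether the current position starts a token
def pvScanB (b : Bool) : List Char → Option Int
  | [] => none
  | c :: rest =>
    if b = true ∧ (c :: rest).take 4 = pvPid then
      PySem.Int.ofChars? (((c :: rest).drop 4).takeWhile pvNonspace)
    else pvScanB (PySem.Chars.isspace c) rest

-- positional boundary flag: start of string, or preceded by whitespace
def pvFlag (s : List Char) (k : Nat) : Bool :=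
  k == 0 || PySem.Chars.isspace (s.getD (k - 1) ' ')

-- a list whose first 4 elements are "pid=" has it as a prefix
theorem pvTake_prefix (cs : List Char) (h : cs.take 4 = pvPid) : pvPid <+: cs :=
  List.prefix_iff_eq_take.mpr (by simpa [pvPid] using h.symm)

-- no occurrence of "pid=" at all ⇒ the flag scan returns none
theorem pvScanB_none (cs : List Char) (h : ¬ pvPid <:+: cs) : ∀ b, pvScanB b cs = none := by
  induction cs with
  | nil => intro b; rfl
  | cons c rest ih =>
    intro b
    rw [pvScanB, if_neg (fun ⟨_, htk⟩ => h (pvTake_prefix _ htk).isInfix)]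
    exact ih (fun hinf => h (hinf.trans (List.suffix_cons c rest).isInfix)) _

-- one step of the flag scan when it does not fire at position k
theorem pvScanB_step (s : List Char) (k : Nat) (hk : k < s.length)
    (hno : ¬ (pvFlag s k = true ∧ pvPid <+: s.drop k)) :
    pvScanB (pvFlag s k) (s.drop k) = pvScanB (pvFlag s (k + 1)) (s.drop (k + 1)) := by
  rw [List.drop_eq_getElem_cons hk, pvScanB]
  have hflag : pvFlag s (k + 1) = PySem.Chars.isspace s[k] := by
    simp [pvFlag, List.getD, List.getElem?_eq_getElem hk]
  rw [if_neg, hflag]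
  intro ⟨hb, htk⟩
  exact hno ⟨hb, by rw [List.drop_eq_getElem_cons hk]; exact pvTake_prefix _ htk⟩

-- walk the flag scan from position k to position i when "pid=" never starts in between
theorem pvScanB_walk (s : List Char) (k : Nat) :
    ∀ i, k ≤ i → i ≤ s.length → (∀ j, k ≤ j → j < i → ¬ pvPid <+: s.drop j) →
      pvScanB (pvFlag s k) (s.drop k) = pvScanB (pvFlag s i) (s.drop i) := by
  intro i
  induction i with
  | zero =>
    intro h1 _ _
    obtain rfl : k = 0 := Nat.le_zero.mp h1
    rfl
  | succ n ih =>
    intro h1 h2 h3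
    by_cases hkn : k = n + 1
    · subst hkn; rfl
    · have hk : k ≤ n := by omega
      rw [ih hk (by omega) (fun j hj1 hj2 => h3 j hj1 (by omega))]
      exact pvScanB_step s n (by omega) (fun ⟨_, hp⟩ => h3 n hk (by omega) hp)

-- the flag scan fires at a boundary occurrence
theorem pvScanB_fire (s : List Char) (i : Nat) (hpre : pvPid <+: s.drop i)
    (hb : pvFlag s i = true) :
    pvScanB (pvFlag s i) (s.drop i) = PySem.Int.ofChars? ((s.drop (i + 4)).takeWhile pvNonspace) := by
  have hlen : i < s.length := by
    have := hpre.length_le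
    simp only [List.length_drop, pvPid, List.length_cons, List.length_nil] at this
    omega
  have htk : (s.drop i).take 4 = pvPid := by
    have := List.prefix_iff_eq_take.mp hpre
    simpa [pvPid] using this.symm
  have hd : (s[i] :: s.drop (i + 1)).drop 4 = s.drop (i + 4) := by
    rw [← List.drop_eq_getElem_cons hlen, List.drop_drop]
  rw [List.drop_eq_getElem_cons hlen, pvScanB,
    if_pos ⟨hb, by rw [← List.drop_eq_getElem_cons hlen]; exact htk⟩, hd]

-- main B-side lemma: pvScan from k computes the flag scan at position k
theorem pvScan_eq (s : List Char) : ∀ k, k ≤ s.length → pvScan s k = pvScanB (pvFlag s k) (s.drop k) := by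
  intro k
  induction k using pvScan.induct (s := s) with
  | case1 k i hi =>
    intro hk
    replace hi : PySem.Chars.findFrom s pvPid (k : Int) = -1 := hi
    rw [pvScan]
    simp only [dif_pos hi]
    have hfind : PySem.Chars.find (s.drop k) pvPid = -1 := by
      have heq := PySem.Chars.findFrom_natCast s pvPid k hk
      rw [heq] at hi
      by_contra hne
      rw [if_neg hne] at hi
      have := PySem.Chars.neg_one_le_find (s.drop k) pvPid
      omega
    exact (pvScanB_none _ ((PySem.Chars.find_eq_neg_one_iff _ _).mp hfind) _).symm
  | case2 k i hi hbd =>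
    intro hk
    replace hi : ¬ PySem.Chars.findFrom s pvPid (k : Int) = -1 := hi
    replace hbd : PySem.Chars.findFrom s pvPid (k : Int) = 0 ∨
        PySem.Chars.isspace (s.getD ((PySem.Chars.findFrom s pvPid (k : Int)).toNat - 1) ' ') = true := hbd
    clear_value i
    rw [pvScan]
    simp only [dif_neg hi, if_pos hbd]
    obtain ⟨hle, hpre, hnone⟩ := PySem.Chars.findFrom_natCast_spec s pvPid k hk hi
    set i := PySem.Chars.findFrom s pvPid (k : Int) with hidef
    have hge0 : (0 : Int) ≤ i := by omega
    have hilen : i.toNat + 4 ≤ s.length := by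
      have := hpre.length_le
      simp only [List.length_drop, pvPid, List.length_cons, List.length_nil] at this
      omega
    have hflag : pvFlag s i.toNat = true := by
      simp only [pvFlag, Bool.or_eq_true, beq_iff_eq]
      rcases hbd with h0 | hsp
      · exact Or.inl (by rw [hidef] at h0; omega)
      · exact Or.inr hsp
    rw [pvScanB_walk s k i.toNat (by omega) (by omega)
        (fun j hj1 hj2 => hnone j hj1 (by omega)),
      pvScanB_fire s i.toNat hpre hflag]
  | case3 k i hi hbd ih =>
    intro hk
    replace hi : ¬ PySem.Chars.findFrom s pvPid (k : Int) = -1 := hi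
    replace hbd : ¬ (PySem.Chars.findFrom s pvPid (k : Int) = 0 ∨
        PySem.Chars.isspace (s.getD ((PySem.Chars.findFrom s pvPid (k : Int)).toNat - 1) ' ') = true) := hbd
    replace ih : k ≤ s.length →
        ((PySem.Chars.findFrom s pvPid (k : Int)).toNat + 1 ≤ s.length →
          pvScan s ((PySem.Chars.findFrom s pvPid (k : Int)).toNat + 1) =
            pvScanB (pvFlag s ((PySem.Chars.findFrom s pvPid (k : Int)).toNat + 1))
              (s.drop ((PySem.Chars.findFrom s pvPid (k : Int)).toNat + 1))) := fun _ => ih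
    clear_value i
    rw [pvScan]
    simp only [dif_neg hi, if_neg hbd]
    obtain ⟨hle, hpre, hnone⟩ := PySem.Chars.findFrom_natCast_spec s pvPid k hk hi
    set i := PySem.Chars.findFrom s pvPid (k : Int) with hidef
    have hge0 : (0 : Int) ≤ i := by omega
    have hilen : i.toNat + 4 ≤ s.length := by
      have := hpre.length_le
      simp only [List.length_drop, pvPid, List.length_cons, List.length_nil] at this
      omega
    have hflag : pvFlag s i.toNat = false := by
      simp only [pvFlag, Bool.or_eq_false_iff, beq_eq_false_iff_ne]
      refine ⟨fun h0 => hbd (Or.inl (by omega)), ?_⟩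
      by_contra hsp
      simp only [Bool.not_eq_false] at hsp
      exact hbd (Or.inr hsp)
    rw [ih hk (by omega),
      pvScanB_walk s k i.toNat (by omega) (by omega)
        (fun j hj1 hj2 => hnone j hj1 (by omega)),
      pvScanB_step s i.toNat (by omega) (by rw [hflag]; rintro ⟨h, -⟩; cases h)]

-- continuing the flag scan inside a token: skip to the end of the token
theorem pvScanB_false (cs : List Char) : pvScanB false cs = pvScanB true (cs.dropWhile pvNonspace) := by
  induction cs with
  | nil => rfl
  | cons c rest ih =>
    by_cases hc : PySem.Chars.isspace c = true
    · have hns : pvNonspace c = false := by simp [pvNonspace, hc]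
      rw [pvScanB, if_neg (by rintro ⟨h, -⟩; cases h), hc, List.dropWhile_cons_of_neg (by simp [hns])]
      rw [pvScanB, if_neg]
      · rw [hc]
      · rintro ⟨-, htk⟩
        have hcp : c = 'p' := (List.cons_prefix_cons.mp (by
          simpa [pvPid] using pvTake_prefix _ htk)).1.symm
        rw [hcp] at hc; exact absurd hc (by decide)
    · have hns : pvNonspace c = true := by simp [pvNonspace, hc]
      rw [pvScanB, if_neg (by rintro ⟨h, -⟩; cases h),
        List.dropWhile_cons_of_pos (by simp [hns]),
        show PySem.Chars.isspace c = false from by simpa using hc]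
      exact ih

-- the flag scan with the flag raised equals the A-side char scan
theorem pvScanB_eq_alt (cs : List Char) : pvScanB true cs = pvAltScan cs := by
  induction cs using pvAltScan.induct with
  | case1 => simp [pvScanB, pvAltScan]
  | case2 c rest hsp ih =>
    rw [pvAltScan, if_pos hsp, pvScanB, if_neg, hsp]
    · exact ih
    · rintro ⟨-, htk⟩
      have hcp : c = 'p' := (List.cons_prefix_cons.mp (by
        simpa [pvPid] using pvTake_prefix _ htk)).1.symm
      rw [hcp] at hsp; exact absurd hsp (by decide)
  | case3 c rest hsp htake =>
    rw [pvAltScan, if_neg hsp, if_pos htake, pvScanB, if_pos ⟨rfl, htake⟩]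
    congr 1
    obtain ⟨d1, d2, d3, r, rfl⟩ : ∃ d1 d2 d3 r, rest = d1 :: d2 :: d3 :: r := by
      cases rest with
      | nil => simp [List.take, pvPid] at htake
      | cons a t =>
        cases t with
        | nil => simp [List.take, pvPid] at htake
        | cons b u =>
          cases u with
          | nil => simp [List.take, pvPid] at htake
          | cons e v => exact ⟨a, b, e, v, rfl⟩
    have h4 := htake
    simp [List.take, pvPid] at h4
    obtain ⟨rfl, rfl, rfl, rfl⟩ := h4
    have e1 : PySem.Chars.isspace 'p' = false := by decide
    have e2 : PySem.Chars.isspace 'i' = false := by decide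
    have e3 : PySem.Chars.isspace 'd' = false := by decide
    have e4 : PySem.Chars.isspace '=' = false := by decide
    simp [pvNonspace, e1, e2, e3, e4]
  | case4 c rest hsp htake ih =>
    rw [pvAltScan, if_neg hsp, if_neg htake, pvScanB, if_neg (by rintro ⟨-, h⟩; exact htake h),
      show PySem.Chars.isspace c = false from by simpa using hsp, pvScanB_false, ih]

-- ===== VERDICT (by name: the statement is the Claim_ definition above) =====
theorem parse_owner_pid_py_spec : Claim_equal_parse_owner_pid_py := by
  intro content _
  unfold Spec_parse_owner_pid_py parse_owner_pid_py parse_owner_pid_py_alt PySem.Str.split₀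
  rw [PySem.Chars.split₀, ← pvMain, ← pvScanB_eq_alt,
    pvScan_eq content.toList 0 (by omega)]
  rfl
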